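-- pv_equiv track=rewrite | github.com/GSbioinfo/scEDIT | gRNA_ML_models/gRNA_context_writer.py | find_ng_pams_both_strands
-- ===== SOURCE A (Python) =====
-- def reverse_complement(seq):
--     return str(seq.translate(str.maketrans("ACGT", "TGCA"))[::-1])
--
-- def get_base_edit_window(seq, start=4, end=8):
--     return seq[start-1:end]
--
-- def get_context_sequence(seq, pam_start, strand, total_length=30):
--     """
--     Extract 30nt context centered on gRNA + PAM. Adjusted for strand.
--     """
--     if strand == '+':
--         center_start = max(pam_start - 20 - (total_length - 23)//2, 0)
--         return seq[center_start:center_start + total_length]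
--     else:
--         center_start = pam_start - 3 - (total_length - 23)//2
--         center_start = max(center_start, 0)
--         seq_segment = seq[center_start:center_start + total_length]
--         return reverse_complement(seq_segment)
--
-- def find_ng_pams_both_strands(sequence, gRNA, edit_window=(4, 8)):
--     hits = []
--     guide_length= len(gRNA)
--     sequence = sequence.upper()
--     rev_sequence = reverse_complement(sequence)
--     gRNARC = reverse_complement(gRNA)
--     valid_first_bases = {'A', 'T', 'C', 'G'}
--
--     # Forward strand (+)
--     for i in range(len(sequence) - 1):
--         pam = sequence[i:i+2]
--         if pam[0] in valid_first_bases and pam[1] == 'G':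
--             guide_start = max(i - guide_length, 0)
--             guide_seq = sequence[guide_start:i] if i - guide_length >= 0 else "N/A"
--             if(guide_seq == gRNA):
--                 context = get_context_sequence(sequence, i, '+')
--                 hits.append(('+', i, guide_seq, pam,
--                              get_base_edit_window(guide_seq, *edit_window), context))
--
--
--     # Reverse strand (−)
--     for i in range(len(rev_sequence) - 1):
--         pam = rev_sequence[i:i+2]
--         if pam[0] in valid_first_bases and pam[1] == 'G':
--             # Position in original sequence (reverse of reverse)
--             orig_pos = len(sequence) - i - 2
--             guide_end = orig_pos + 2 + guide_length
--             guide_seq = sequence[orig_pos+2 : guide_end] if guide_end <= len(sequence) else "N/A"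
--             if(guide_seq == gRNA):
--                 context = get_context_sequence(sequence, orig_pos, '-')
--                 hits.append(('-', orig_pos, guide_seq, pam,
--                              get_base_edit_window(guide_seq, *edit_window), context))
--
--     return hits
-- ===== SOURCE B (Python) =====
-- # B: locate gRNA occurrences with C-level str.find, then O(1) PAM check per occurrence,
-- # instead of slicing/comparing at every position of the sequence.
--
-- _COMP = str.maketrans("ACGT", "TGCA")
--
-- def reverse_complement(seq):
--     return str(seq.translate(_COMP)[::-1])
--
-- def _pam_scan(s, pattern):
--     """Indices i such that `pattern` occurs at s[i-len(pattern):i] and s[i:i+2] is an NG PAM."""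
--     n, g = len(s), len(pattern)
--     out = []
--     p = s.find(pattern)
--     while p != -1:
--         i = p + g
--         if i + 2 <= n and s[i] in "ACGT" and s[i + 1] == "G":
--             out.append(i)
--         p = s.find(pattern, p + 1)
--     return out
--
-- def find_ng_pams_both_strands(sequence, gRNA, edit_window=(4, 8)):
--     seq = sequence.upper()
--     rev = reverse_complement(seq)
--     n = len(seq)
--     start = edit_window[0] if len(edit_window) > 0 else 4
--     end = edit_window[1] if len(edit_window) > 1 else 8
--     window = gRNA[start - 1:end]
--     hits = []
--     for i in _pam_scan(seq, gRNA):
--         cs = max(i - 23, 0)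
--         hits.append(('+', i, gRNA, seq[i:i + 2], window, seq[cs:cs + 30]))
--     for i in _pam_scan(rev, reverse_complement(gRNA)):
--         pos = n - i - 2
--         cs = max(pos - 6, 0)
--         hits.append(('-', pos, gRNA, rev[i:i + 2], window, reverse_complement(seq[cs:cs + 30])))
--     return hits
-- ===== Notes on version B (the rewrite author's own statement) =====
-- stated objective: faster
-- what changed: Instead of testing every position of the sequence with a Python-level slice-and-compare against the gRNA (on both strands), B locates the gRNA occurrences with C-level str.find (forward on the sequence, and on the reverse complement for the minus strand) and does one O(1) NG-PAM check per occurrence.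
-- intended difference: On inputs whose gRNA is literally the string "N/A" and whose sequence has an NG PAM too close to the relevant end to fit a full-length guide, A returns extra spurious hits (its out-of-range sentinel guide "N/A" compares equal to the gRNA); B reports only genuine guide occurrences there, which is the intended behaviour. — e.g. on find_ng_pams_both_strands("AG", "N/A", [4, 8]): A returns [("+", 0, "N/A", "AG", "", "AG")], B returns []
import Mathlib
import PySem

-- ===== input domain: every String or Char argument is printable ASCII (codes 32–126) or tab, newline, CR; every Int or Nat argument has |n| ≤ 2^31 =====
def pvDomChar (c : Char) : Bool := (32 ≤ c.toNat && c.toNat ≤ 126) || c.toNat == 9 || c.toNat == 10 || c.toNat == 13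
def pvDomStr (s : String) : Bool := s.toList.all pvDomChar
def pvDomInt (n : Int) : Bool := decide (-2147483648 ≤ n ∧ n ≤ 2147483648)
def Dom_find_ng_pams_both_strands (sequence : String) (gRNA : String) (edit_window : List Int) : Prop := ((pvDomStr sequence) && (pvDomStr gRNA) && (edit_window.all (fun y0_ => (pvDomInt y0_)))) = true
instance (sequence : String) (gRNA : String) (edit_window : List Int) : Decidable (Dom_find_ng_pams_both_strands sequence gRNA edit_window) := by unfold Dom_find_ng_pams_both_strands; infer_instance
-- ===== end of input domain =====

-- B locates gRNA occurrences with a find-based scan (one O(1) PAM check per occurrence)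
-- instead of A's slice-and-compare at every position of the sequence, on both strands.

-- ===== PORT A =====

-- str.maketrans("ACGT", "TGCA") applied by str.translate: exactly these four characters
-- are mapped, every other character is unchanged.
def pvComp (c : Char) : Char :=
  if c = 'A' then 'T' else if c = 'C' then 'G' else if c = 'G' then 'C' else if c = 'T' then 'A' else c

-- reverse_complement(seq) = seq.translate(...)[::-1]; [::-1] is reverse (PySem.List.slice?_none_none_neg_one).
def pvRevComp (s : List Char) : List Char := (s.map pvComp).reverse

-- pam[0] in {'A', 'T', 'C', 'G'}
def pvIsBase (c : Char) : Bool := c == 'A' || c == 'T' || c == 'C' || c == 'G'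

-- pam[0] in valid_first_bases and pam[1] == 'G'; at every call site pam has exactly
-- two characters (i ranges over range(len-1)), so the fall-through is unreachable.
def pvPamCheck (pam : List Char) : Bool :=
  match pam with
  | c0 :: c1 :: _ => pvIsBase c0 && (c1 == 'G')
  | _ => false

-- *edit_window against get_base_edit_window(seq, start=4, end=8); more than two
-- elements raise TypeError (excluded by Pre_), so the fall-through is unreachable.
def pvWindowArgs (ew : List Int) : Int × Int :=
  match ew with
  | [] => (4, 8)
  | [a] => (a, 8)
  | a :: b :: _ => (a, b)

-- get_base_edit_window(seq, start, end) = seq[start-1:end]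
def pvEditWindow (seq : List Char) (start endv : Int) : List Char :=
  PySem.List.slice seq (some (start - 1)) (some endv)

-- get_context_sequence(seq, pam_start, '+')
def pvContextPlus (s : List Char) (pam_start : Int) : List Char :=
  let center_start := max (pam_start - 20 - PySem.Int.floordiv (30 - 23) 2) 0
  PySem.List.slice s (some center_start) (some (center_start + 30))

-- get_context_sequence(seq, pam_start, '-')
def pvContextMinus (s : List Char) (pam_start : Int) : List Char :=
  let center_start := max (pam_start - 3 - PySem.Int.floordiv (30 - 23) 2) 0
  pvRevComp (PySem.List.slice s (some center_start) (some (center_start + 30)))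

def find_ng_pams_both_strands (sequence : String) (gRNA : String) (edit_window : List Int) :
    List (String × Int × String × String × String × String) :=
  let gl : List Char := gRNA.toList
  let guide_length : Nat := gl.length
  let s : List Char := PySem.Chars.upper sequence.toList     -- sequence = sequence.upper()
  let rev : List Char := pvRevComp s                         -- rev_sequence (gRNARC is computed by A but never used)
  let w := pvWindowArgs edit_window
  -- Forward strand (+)
  let hits1 :=
    (PySem.List.pyRange 0 ((s.length : Int) - 1) 1).foldl (fun hits i =>
      let pam := PySem.List.slice s (some i) (some (i + 2))
      if pvPamCheck pam then
        let guide_start : Int := max (i - (guide_length : Int)) 0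
        let guide_seq : List Char :=
          if 0 ≤ i - (guide_length : Int) then PySem.List.slice s (some guide_start) (some i)
          else ['N', '/', 'A']
        if guide_seq = gl then
          hits ++ [("+", i, String.ofList guide_seq, String.ofList pam,
                    String.ofList (pvEditWindow guide_seq w.1 w.2),
                    String.ofList (pvContextPlus s i))]
        else hits
      else hits) []
  -- Reverse strand (−)
  (PySem.List.pyRange 0 ((rev.length : Int) - 1) 1).foldl (fun hits i =>
      let pam := PySem.List.slice rev (some i) (some (i + 2))
      if pvPamCheck pam then
        let orig_pos : Int := (s.length : Int) - i - 2
        let guide_end : Int := orig_pos + 2 + (guide_length : Int)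
        let guide_seq : List Char :=
          if guide_end ≤ (s.length : Int) then
            PySem.List.slice s (some (orig_pos + 2)) (some guide_end)
          else ['N', '/', 'A']
        if guide_seq = gl then
          hits ++ [("-", orig_pos, String.ofList guide_seq, String.ofList pam,
                    String.ofList (pvEditWindow guide_seq w.1 w.2),
                    String.ofList (pvContextMinus s orig_pos))]
        else hits
      else hits) hits1

-- ===== PORT B =====

-- i + 2 <= n and s[i] in "ACGT" and s[i + 1] == "G"  (indexing via pyGet?; both
-- indexes are in range whenever the first conjunct holds)
def pvScanCond (s : List Char) (i : Int) : Bool :=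
  decide (i + 2 ≤ (s.length : Int)) &&
    (match PySem.List.pyGet? s i, PySem.List.pyGet? s (i + 1) with
     | some c0, some c1 => pvIsBase c0 && (c1 == 'G')
     | _, _ => false)

-- the `while p != -1` loop of _pam_scan; fuel s.length + 2 bounds the iteration count
-- (p strictly increases and stays ≤ len(s)), it is reached before the fuel runs out.
def pvScanGo (s pat : List Char) (p : Int) : Nat → List Int
  | 0 => []
  | fuel + 1 =>
    if p = -1 then []
    else
      (if pvScanCond s (p + (pat.length : Int)) then [p + (pat.length : Int)] else []) ++
      pvScanGo s pat (PySem.Chars.findFrom s pat (p + 1)) fuel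

def pvPamScan (s pat : List Char) : List Int :=
  pvScanGo s pat (PySem.Chars.find s pat) (s.length + 2)

def find_ng_pams_both_strands_alt (sequence : String) (gRNA : String) (edit_window : List Int) :
    List (String × Int × String × String × String × String) :=
  let s : List Char := PySem.Chars.upper sequence.toList
  let rev : List Char := pvRevComp s
  let n : Nat := s.length
  let start : Int := (PySem.List.pyGet? edit_window 0).getD 4   -- edit_window[0] if len > 0 else 4
  let endv : Int := (PySem.List.pyGet? edit_window 1).getD 8    -- edit_window[1] if len > 1 else 8
  let window : List Char := PySem.List.slice gRNA.toList (some (start - 1)) (some endv)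
  ((pvPamScan s gRNA.toList).map (fun i =>
      let cs := max (i - 23) 0
      ("+", i, gRNA, String.ofList (PySem.List.slice s (some i) (some (i + 2))),
       String.ofList window,
       String.ofList (PySem.List.slice s (some cs) (some (cs + 30)))))) ++
  ((pvPamScan rev (pvRevComp gRNA.toList)).map (fun i =>
      let pos := (n : Int) - i - 2
      let cs := max (pos - 6) 0
      ("-", pos, gRNA, String.ofList (PySem.List.slice rev (some i) (some (i + 2))),
       String.ofList window,
       String.ofList (pvRevComp (PySem.List.slice s (some cs) (some (cs + 30)))))))

-- ===== PRECONDITION & SPEC =====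

-- Pre_ excludes exactly the inputs on which A raises: with an edit window of more than
-- two elements, *edit_window raises TypeError as soon as there is a hit to report
-- (an NG PAM adjacent, on either strand, to a guide match or to an out-of-range
-- guide while gRNA = "N/A"); with no hit, or at most two elements, A returns.
def Pre_find_ng_pams_both_strands (sequence : String) (gRNA : String) (edit_window : List Int) : Prop :=
  edit_window.length ≤ 2 ∨
  (let s := PySem.Chars.upper sequence.toList
   let L := s.length
   let g := gRNA.toList.length
   ¬ ∃ i < L,
      (i + 2 ≤ L ∧ (s[i]! = 'A' ∨ s[i]! = 'T' ∨ s[i]! = 'C' ∨ s[i]! = 'G') ∧ s[i + 1]! = 'G' ∧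
        ((g ≤ i ∧ (s.drop (i - g)).take g = gRNA.toList) ∨ (i < g ∧ gRNA = "N/A"))) ∨
      (i + 2 ≤ L ∧ s[L - 2 - i]! = 'C' ∧
        (s[L - 1 - i]! = 'A' ∨ s[L - 1 - i]! = 'T' ∨ s[L - 1 - i]! = 'C' ∨ s[L - 1 - i]! = 'G') ∧
        ((g ≤ i ∧ (s.drop (L - i)).take g = gRNA.toList) ∨ (i < g ∧ gRNA = "N/A"))))
instance (sequence : String) (gRNA : String) (edit_window : List Int) : Decidable (Pre_find_ng_pams_both_strands sequence gRNA edit_window) := by unfold Pre_find_ng_pams_both_strands; infer_instance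

def pvWitness_find_ng_pams_both_strands : String × String × List Int := ("CCAACGTACGG", "ACGTA", [4, 8])

-- On inputs whose gRNA is literally the string "N/A" and whose (upper-cased) sequence has an
-- NG PAM too close to the relevant end for a full-length guide, A returns extra spurious hits:
-- its out-of-range sentinel guide "N/A" accidentally compares equal to the gRNA; B reports
-- only genuine guide occurrences there, which is the intended behaviour.
def D_find_ng_pams_both_strands (sequence : String) (gRNA : String) (edit_window : List Int) : Prop :=
  gRNA = "N/A" ∧
  ((∃ i < 3, i + 2 ≤ (PySem.Chars.upper sequence.toList).length ∧
      ((PySem.Chars.upper sequence.toList)[i]! = 'A' ∨ (PySem.Chars.upper sequence.toList)[i]! = 'T' ∨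
       (PySem.Chars.upper sequence.toList)[i]! = 'C' ∨ (PySem.Chars.upper sequence.toList)[i]! = 'G') ∧
      (PySem.Chars.upper sequence.toList)[i + 1]! = 'G') ∨
   (∃ p < (PySem.Chars.upper sequence.toList).length,
      p + 2 ≤ (PySem.Chars.upper sequence.toList).length ∧
      (PySem.Chars.upper sequence.toList).length ≤ p + 4 ∧
      (PySem.Chars.upper sequence.toList)[p]! = 'C' ∧
      ((PySem.Chars.upper sequence.toList)[p + 1]! = 'A' ∨ (PySem.Chars.upper sequence.toList)[p + 1]! = 'T' ∨
       (PySem.Chars.upper sequence.toList)[p + 1]! = 'C' ∨ (PySem.Chars.upper sequence.toList)[p + 1]! = 'G')))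
instance (sequence : String) (gRNA : String) (edit_window : List Int) : Decidable (D_find_ng_pams_both_strands sequence gRNA edit_window) := by unfold D_find_ng_pams_both_strands; infer_instance

def Spec_find_ng_pams_both_strands (sequence : String) (gRNA : String) (edit_window : List Int) (out : List (String × Int × String × String × String × String)) : Prop := ¬ D_find_ng_pams_both_strands sequence gRNA edit_window → out = find_ng_pams_both_strands_alt sequence gRNA edit_window
instance (sequence : String) (gRNA : String) (edit_window : List Int) (out : List (String × Int × String × String × String × String)) : Decidable (Spec_find_ng_pams_both_strands sequence gRNA edit_window out) := by unfold Spec_find_ng_pams_both_strands; infer_instance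

def pvDiffWitness_find_ng_pams_both_strands : String × String × List Int := ("AG", "N/A", [4, 8])

def pvDiffWitnessOut_find_ng_pams_both_strands :
    (List (String × Int × String × String × String × String)) × (List (String × Int × String × String × String × String)) :=
  ([("+", 0, "N/A", "AG", "", "AG")], [])

-- ===== CLAIM (what is proved, stated in full; the proofs are below) =====
def Claim_unchanged_find_ng_pams_both_strands : Prop := ∀ (sequence : String) (gRNA : String) (edit_window : List Int), Dom_find_ng_pams_both_strands sequence gRNA edit_window → Pre_find_ng_pams_both_strands sequence gRNA edit_window → Spec_find_ng_pams_both_strands sequence gRNA edit_window (find_ng_pams_both_strands sequence gRNA edit_window)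
def Claim_changed_find_ng_pams_both_strands : Prop := Dom_find_ng_pams_both_strands (pvDiffWitness_find_ng_pams_both_strands.1) (pvDiffWitness_find_ng_pams_both_strands.2.1) (pvDiffWitness_find_ng_pams_both_strands.2.2) ∧ Pre_find_ng_pams_both_strands (pvDiffWitness_find_ng_pams_both_strands.1) (pvDiffWitness_find_ng_pams_both_strands.2.1) (pvDiffWitness_find_ng_pams_both_strands.2.2) ∧ D_find_ng_pams_both_strands (pvDiffWitness_find_ng_pams_both_strands.1) (pvDiffWitness_find_ng_pams_both_strands.2.1) (pvDiffWitness_find_ng_pams_both_strands.2.2) ∧ find_ng_pams_both_strands (pvDiffWitness_find_ng_pams_both_strands.1) (pvDiffWitness_find_ng_pams_both_strands.2.1) (pvDiffWitness_find_ng_pams_both_strands.2.2) = pvDiffWitnessOut_find_ng_pams_both_strands.1 ∧ find_ng_pams_both_strands_alt (pvDiffWitness_find_ng_pams_both_strands.1) (pvDiffWitness_find_ng_pams_both_strands.2.1) (pvDiffWitness_find_ng_pams_both_strands.2.2) = pvDiffWitnessOut_find_ng_pams_both_strands.2 ∧ pvDiffWitnessOut_find_ng_pams_both_strands.1 ≠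 pvDiffWitnessOut_find_ng_pams_both_strands.2
def Claim_exact_find_ng_pams_both_strands : Prop := ∀ (sequence : String) (gRNA : String) (edit_window : List Int), Dom_find_ng_pams_both_strands sequence gRNA edit_window → Pre_find_ng_pams_both_strands sequence gRNA edit_window → D_find_ng_pams_both_strands sequence gRNA edit_window → find_ng_pams_both_strands sequence gRNA edit_window ≠ find_ng_pams_both_strands_alt sequence gRNA edit_window

-- ===== LEMMAS AND PROOFS =====

-- p is a hit of the scan over s with pattern pat: pat occurs at p and an NG PAM follows it.
def pvHitP (s pat : List Char) (p : Nat) : Bool :=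
  decide (pat <+: s.drop p) && pvScanCond s ((p : Int) + (pat.length : Int))

def pvHitIdx (s pat : List Char) : List Nat :=
  (List.range (s.length + 1)).filter (pvHitP s pat)

-- sentinel positions of one of A's strand loops: an NG PAM within guide_length of the
-- start, whose out-of-range guide string compares equal to the gRNA
def pvSentIdx (u gl : List Char) (GS : Int → List Char) : List Nat :=
  (List.range (min gl.length (u.length - 1))).filter
    (fun i : Nat => pvPamCheck (PySem.List.slice u (some (i : Int)) (some ((i : Int) + 2)))
        && decide (GS (i : Int) = gl))

theorem pvScanGo_neg_one (s pat : List Char) (fuel : Nat) : pvScanGo s pat (-1) fuel = [] := by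
  cases fuel <;> simp [pvScanGo]

theorem pvFindFrom_past (s pat : List Char) (k : Nat) (h : s.length < k) :
    PySem.Chars.findFrom s pat (k : Int) none = -1 := by
  have h1 : ¬((k:Int) < 0) := by omega
  have h2 : ((s.length : Nat) : Int) < (k:Int) := by exact_mod_cast h
  unfold PySem.Chars.findFrom
  simp only [if_neg h1, if_pos h2]

theorem pvScanGo_spec (s pat : List Char) :
    ∀ (fuel k : Nat), k ≤ s.length → s.length + 1 ≤ fuel + k →
    pvScanGo s pat (PySem.Chars.findFrom s pat (k : Int)) fuel =
      ((List.range' k (s.length + 1 - k)).filter (pvHitP s pat)).map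
        (fun p : Nat => ((p : Int) + (pat.length : Int))) := by
  intro fuel
  induction fuel with
  | zero => intro k hk hf; omega
  | succ fuel ih =>
    intro k hk hf
    by_cases hneg : PySem.Chars.findFrom s pat (k : Int) = -1
    · rw [hneg, pvScanGo_neg_one]
      have hno : ¬ pat <:+: s.drop k := (PySem.Chars.findFrom_natCast_eq_neg_one_iff s pat k hk).mp hneg
      have hnil : (List.range' k (s.length + 1 - k)).filter (pvHitP s pat) = [] := by
        rw [List.filter_eq_nil_iff]
        intro p hp hhit
        have hkp : k ≤ p := (List.mem_range'_1.mp hp).1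
        have hpre : pat <+: s.drop p := by
          unfold pvHitP at hhit
          exact of_decide_eq_true (Bool.and_elim_left hhit)
        apply hno
        have hpre' : pat <+: (s.drop k).drop (p - k) := by
          rw [List.drop_drop]
          have e : k + (p - k) = p := by omega
          rw [e]
          exact hpre
        exact (PySem.Chars.isIn_iff_infix _ _).mp
          ((PySem.Chars.exists_prefix_drop_iff_isIn pat (s.drop k)).mp ⟨p - k, hpre'⟩)
      rw [hnil]
      rfl
    · obtain ⟨hge, hpre, hmin⟩ := PySem.Chars.findFrom_natCast_spec s pat k hk hneg
      have hr0 : (0:Int) ≤ PySem.Chars.findFrom s pat (k:Int) := le_trans (by positivity) hge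
      set r := PySem.Chars.findFrom s pat (k:Int) with hrdef
      set rn := r.toNat with hrn
      have hrcast : r = (rn : Int) := by omega
      have hkr : k ≤ rn := by omega
      have hrL : rn ≤ s.length := by
        by_cases hpat : pat = []
        · subst hpat
          by_contra hcon
          exact hmin k (le_refl k) (by omega) (List.nil_prefix)
        · have hlen : pat.length ≤ (s.drop rn).length := hpre.length_le
          rw [List.length_drop] at hlen
          have : 0 < pat.length := List.length_pos_iff.mpr hpat
          omega
      -- unfold one loop step
      rw [pvScanGo, if_neg hneg]
      -- split the range at rn
      have hsplit : List.range' k (s.length + 1 - k) =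
          List.range' k (rn - k) ++ rn :: List.range' (rn + 1) (s.length - rn) := by
        have e1 : s.length + 1 - rn = (s.length - rn) + 1 := by omega
        have hap : List.range' k (rn - k) ++ List.range' (k + 1 * (rn - k)) (s.length + 1 - rn) =
            List.range' k ((rn - k) + (s.length + 1 - rn)) := List.range'_append
        have e2 : k + 1 * (rn - k) = rn := by omega
        have e3 : (rn - k) + (s.length + 1 - rn) = s.length + 1 - k := by omega
        rw [e2, e3, e1] at hap
        rw [← hap, List.range'_succ]
      rw [hsplit, List.filter_append, List.map_append]
      have hfirst : (List.range' k (rn - k)).filter (pvHitP s pat) = [] := by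
        rw [List.filter_eq_nil_iff]
        intro p hp hhit
        have hmem := List.mem_range'_1.mp hp
        have hpre' : pat <+: s.drop p := by
          unfold pvHitP at hhit
          exact of_decide_eq_true (Bool.and_elim_left hhit)
        exact hmin p hmem.1 (by omega) hpre'
      rw [hfirst]
      have hhit_rn : pvHitP s pat rn = pvScanCond s ((rn : Int) + (pat.length : Int)) := by
        unfold pvHitP
        rw [decide_eq_true hpre, Bool.true_and]
      -- the tail of the loop
      have htail : pvScanGo s pat (PySem.Chars.findFrom s pat (r + 1)) fuel =
          (List.filter (pvHitP s pat) (List.range' (rn + 1) (s.length - rn))).map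
            (fun p : Nat => ((p : Int) + (pat.length : Int))) := by
        have ecast : r + 1 = ((rn + 1 : Nat) : Int) := by omega
        rw [ecast]
        by_cases hend : rn = s.length
        · rw [pvFindFrom_past s pat (rn + 1) (by omega), pvScanGo_neg_one]
          rw [hend, Nat.sub_self]
          rfl
        · have h1 : rn + 1 ≤ s.length := by omega
          have h2 : s.length + 1 ≤ fuel + (rn + 1) := by omega
          have e : s.length + 1 - (rn + 1) = s.length - rn := by omega
          rw [ih (rn + 1) h1 h2, e]
      rw [htail]
      -- the emitted element
      rw [List.filter_cons, hhit_rn, hrcast]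
      by_cases hc : pvScanCond s ((rn : Int) + (pat.length : Int)) = true
      · rw [if_pos hc, hc]
        rfl
      · rw [if_neg hc, Bool.not_eq_true] at *
        rw [hc]
        rfl

theorem pvPamScan_spec (s pat : List Char) :
    pvPamScan s pat = (pvHitIdx s pat).map (fun p : Nat => ((p : Int) + (pat.length : Int))) := by
  have h := pvScanGo_spec s pat (s.length + 2) 0 (by omega) (by omega)
  rw [pvPamScan, ← PySem.Chars.findFrom_zero]
  simpa [pvHitIdx, List.range_eq_range'] using h

-- pvScanCond at a natural index, in terms of the characters of s.
theorem pvScanCond_natCast (s : List Char) (i : Nat) :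
    pvScanCond s (i : Int) = true ↔
      i + 2 ≤ s.length ∧ pvIsBase s[i]! = true ∧ s[i + 1]! = 'G' := by
  unfold pvScanCond
  by_cases h : i + 2 ≤ s.length
  · have h1 : i < s.length := by omega
    have h2 : i + 1 < s.length := by omega
    have e1 : PySem.List.pyGet? s (i:Int) = some s[i] := by
      simp only [pysem]; exact List.getElem?_eq_getElem h1
    have e2 : PySem.List.pyGet? s ((i:Int)+1) = some s[i+1] := by
      have e : ((i:Int)+1) = ((i+1 : Nat) : Int) := by push_cast; ring
      rw [e]; simp only [pysem]; exact List.getElem?_eq_getElem h2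
    rw [e1, e2, getElem!_pos s i h1, getElem!_pos s (i+1) h2]
    simp [h]
    omega
  · have e1 : ¬((i:Int) + 2 ≤ (s.length : Int)) := by omega
    simp [h, e1]

-- pvPamCheck of the two-character slice is pvScanCond.
theorem pvPamCheck_slice (s : List Char) (i : Nat) (h : i + 2 ≤ s.length) :
    pvPamCheck (PySem.List.slice s (some (i : Int)) (some ((i : Int) + 2))) = pvScanCond s (i : Int) := by
  have h1 : i < s.length := by omega
  have h2 : i + 1 < s.length := by omega
  have e : ((i:Int)+2) = ((i+2 : Nat) : Int) := by push_cast; ring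
  rw [e, PySem.List.slice_natCast]
  have hd : s.drop i = s[i] :: s[i+1] :: s.drop (i+2) := by
    rw [List.drop_eq_getElem_cons h1, List.drop_eq_getElem_cons h2]
  rw [hd]
  have e2 : i + 2 - i = 2 := by omega
  rw [e2]
  simp only [List.take, pvPamCheck]
  rw [Bool.eq_iff_iff, pvScanCond_natCast s i, getElem!_pos s i h1, getElem!_pos s (i+1) h2]
  simp [h]

theorem pvComp_comp (c : Char) : pvComp (pvComp c) = c := by
  unfold pvComp; split_ifs <;> simp_all

theorem pvRevComp_revComp (x : List Char) : pvRevComp (pvRevComp x) = x := by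
  simp [pvRevComp, List.map_reverse]
  simp [Function.comp_def, pvComp_comp]

theorem pvRevComp_length (x : List Char) : (pvRevComp x).length = x.length := by
  simp [pvRevComp]

-- a slice of the reverse complement is the reverse complement of the mirrored slice
theorem pvRevComp_slice (u : List Char) (p g : Nat) (h : p + g ≤ u.length) :
    ((pvRevComp u).drop p).take g = pvRevComp ((u.drop (u.length - p - g)).take g) := by
  unfold pvRevComp
  rw [List.drop_reverse, List.take_reverse]
  congr 1
  rw [List.length_take, List.length_map]
  have e1 : min (u.length - p) u.length = u.length - p := by omega
  rw [e1, List.drop_take]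
  have e2 : u.length - p - (u.length - p - g) = g := by omega
  rw [e2, ← List.map_drop, ← List.map_take]

-- one of A's strand loops keeps exactly its sentinel hits followed by B's scan hits
theorem pvLoopA_eq_gen {α : Type} (u gl pat : List Char) (hlen : pat.length = gl.length)
    (GS : Int → List Char) (TA : Int → List Char → List Char → α) (TB : Int → α)
    (hGS : ∀ p : Nat, p + gl.length + 2 ≤ u.length →
        (GS ((p + gl.length : Nat) : Int) = gl ↔ pat <+: u.drop p))
    (hT : ∀ p : Nat, pvHitP u pat p = true →
        TA ((p + gl.length : Nat) : Int) gl
          (PySem.List.slice u (some ((p + gl.length : Nat) : Int)) (some (((p + gl.length : Nat) : Int) + 2)))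
          = TB ((p : Int) + (pat.length : Int)))
    (init : List α) :
    (PySem.List.pyRange 0 ((u.length : Int) - 1) 1).foldl (fun hits i =>
      let pam := PySem.List.slice u (some i) (some (i + 2))
      if pvPamCheck pam then
        let guide_seq := GS i
        if guide_seq = gl then hits ++ [TA i guide_seq pam] else hits
      else hits) init
    = (init ++ (pvSentIdx u gl GS).map (fun i : Nat =>
        TA (i : Int) (GS (i : Int))
          (PySem.List.slice u (some (i : Int)) (some ((i : Int) + 2)))))
      ++ (pvPamScan u pat).map TB := by
  have hrange : PySem.List.pyRange 0 ((u.length : Int) - 1) 1 =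
      (List.range (u.length - 1)).map (fun i : Nat => (i : Int)) := by
    rw [PySem.List.pyRange_one]
    have e : ((u.length : Int) - 1 - 0).toNat = u.length - 1 := by omega
    rw [e]
    exact List.map_congr_left (fun k _ => by omega)
  rw [hrange, List.foldl_map]
  -- the loop body in if-then form
  have hbe : ∀ (x : List α) (y : Nat),
      (let pam := PySem.List.slice u (some (y : Int)) (some ((y : Int) + 2))
       if pvPamCheck pam then
         let guide_seq := GS (y : Int)
         if guide_seq = gl then x ++ [TA (y : Int) guide_seq pam] else x
       else x)
      = (if (pvPamCheck (PySem.List.slice u (some (y : Int)) (some ((y : Int) + 2)))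
            && decide (GS (y : Int) = gl)) then
          x ++ [TA (y : Int) (GS (y : Int))
            (PySem.List.slice u (some (y : Int)) (some ((y : Int) + 2)))]
        else x) := by
    intro x y
    by_cases h1 : pvPamCheck (PySem.List.slice u (some (y : Int)) (some ((y : Int) + 2))) = true
    · by_cases h2 : GS (y : Int) = gl
      · simp [h1, h2]
      · simp [h1, h2]
    · simp [h1]
  simp only [hbe]
  rw [PySem.List.foldl_append_if, List.append_assoc]
  congr 1
  -- characterize both filtered index lists
  set g := gl.length with hg
  set L := u.length with hL
  have hHitBound : ∀ p : Nat, pvHitP u pat p = true → p + g + 2 ≤ L := by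
    intro p hp
    unfold pvHitP at hp
    have hsc := Bool.and_elim_right hp
    have e : (p : Int) + (pat.length : Int) = ((p + g : Nat) : Int) := by
      rw [hlen, hg]; push_cast; ring
    rw [e] at hsc
    have := (pvScanCond_natCast u (p + g)).mp hsc
    omega
  have hkey : (List.range (L - 1)).filter
        (fun i : Nat => pvPamCheck (PySem.List.slice u (some (i : Int)) (some ((i : Int) + 2)))
            && decide (GS (i : Int) = gl))
      = pvSentIdx u gl GS ++ (pvHitIdx u pat).map (fun p => p + g) := by
    by_cases hgL : L ≤ g + 1
    · have hmin : min g (L - 1) = L - 1 := by omega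
      have hnil : (pvHitIdx u pat).map (fun p => p + g) = [] := by
        rw [List.map_eq_nil_iff, pvHitIdx, List.filter_eq_nil_iff]
        intro p _ hp
        have := hHitBound p hp
        omega
      rw [hnil, List.append_nil, pvSentIdx, hmin]
    · have hm : L - 1 = g + (L - 1 - g) := by omega
      have hmin : min g (L - 1) = g := by omega
      set m := L - 1 - g with hmdef
      -- left side: split at g, the tail holds the shifted hits
      have hleft : (List.range (L - 1)).filter
            (fun i : Nat => pvPamCheck (PySem.List.slice u (some (i : Int)) (some ((i : Int) + 2)))
                && decide (GS (i : Int) = gl))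
          = pvSentIdx u gl GS ++ ((List.range m).filter (fun p : Nat =>
              pvPamCheck (PySem.List.slice u (some ((g + p : Nat) : Int)) (some (((g + p : Nat) : Int) + 2)))
                && decide (GS ((g + p : Nat) : Int) = gl))).map (fun p => g + p) := by
        rw [pvSentIdx, hmin, hm, List.range_add, List.filter_append, List.filter_map]
        rfl
      rw [hleft]
      congr 1
      -- right side: positions at or above m never pass
      have hright : pvHitIdx u pat = (List.range m).filter (pvHitP u pat) := by
        rw [pvHitIdx]
        have hm2 : L + 1 = m + (L + 1 - m) := by omega
        rw [hm2, List.range_add, List.filter_append, List.filter_map]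
        have hz : List.filter (pvHitP u pat ∘ fun x => m + x) (List.range (L + 1 - m)) = [] := by
          rw [List.filter_eq_nil_iff]
          intro p hp hbad
          have hb2 : pvHitP u pat (m + p) = true := hbad
          have := hHitBound (m + p) hb2
          omega
        rw [hz]
        simp
      rw [hright]
      -- pointwise agreement on range m
      have hpoint : ∀ p ∈ List.range m,
          (pvPamCheck (PySem.List.slice u (some ((g + p : Nat) : Int)) (some (((g + p : Nat) : Int) + 2)))
            && decide (GS ((g + p : Nat) : Int) = gl)) = pvHitP u pat p := by
        intro p hp
        have hpm : p < m := List.mem_range.mp hp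
        have hbound : p + g + 2 ≤ L := by omega
        have egp : ((g + p : Nat) : Int) = ((p + g : Nat) : Int) := by push_cast; ring
        rw [egp, pvPamCheck_slice u (p + g) hbound]
        unfold pvHitP
        have e2 : (p : Int) + (pat.length : Int) = ((p + g : Nat) : Int) := by
          rw [hlen, hg]; push_cast; ring
        rw [e2, Bool.and_comm]
        congr 1
        rw [decide_eq_decide]
        exact hGS p hbound
      rw [List.filter_congr hpoint]
      exact List.map_congr_left (fun p _ => by omega)
  rw [hkey, List.map_append]
  congr 1
  rw [pvPamScan_spec, List.map_map, List.map_map]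
  refine List.map_congr_left (fun p hp => ?_)
  have hhit : pvHitP u pat p = true := (List.mem_filter.mp hp).2
  have hbound := hHitBound p hhit
  have hpre : pat <+: u.drop p := by
    unfold pvHitP at hhit
    exact of_decide_eq_true (Bool.and_elim_left hhit)
  have hGSgl : GS ((p + g : Nat) : Int) = gl := (hGS p hbound).mpr hpre
  simp only [Function.comp_apply]
  rw [hGSgl]
  exact hT p hhit

-- with no sentinel hits, one of A's strand loops is exactly B's find-based scan
theorem pvLoopA_eq {α : Type} (u gl pat : List Char) (hlen : pat.length = gl.length)
    (GS : Int → List Char) (TA : Int → List Char → List Char → α) (TB : Int → α)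
    (hGS : ∀ p : Nat, p + gl.length + 2 ≤ u.length →
        (GS ((p + gl.length : Nat) : Int) = gl ↔ pat <+: u.drop p))
    (hSent : ∀ i : Nat, i < gl.length → pvScanCond u (i : Int) = true → ¬ GS (i : Int) = gl)
    (hT : ∀ p : Nat, pvHitP u pat p = true →
        TA ((p + gl.length : Nat) : Int) gl
          (PySem.List.slice u (some ((p + gl.length : Nat) : Int)) (some (((p + gl.length : Nat) : Int) + 2)))
          = TB ((p : Int) + (pat.length : Int)))
    (init : List α) :
    (PySem.List.pyRange 0 ((u.length : Int) - 1) 1).foldl (fun hits i =>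
      let pam := PySem.List.slice u (some i) (some (i + 2))
      if pvPamCheck pam then
        let guide_seq := GS i
        if guide_seq = gl then hits ++ [TA i guide_seq pam] else hits
      else hits) init
    = init ++ (pvPamScan u pat).map TB := by
  rw [pvLoopA_eq_gen u gl pat hlen GS TA TB hGS hT init]
  have hsent : pvSentIdx u gl GS = [] := by
    rw [pvSentIdx, List.filter_eq_nil_iff]
    intro i hi hbad
    have hig : i < gl.length := by
      have := List.mem_range.mp hi
      omega
    have hiL : i + 2 ≤ u.length := by
      have := List.mem_range.mp hi
      omega
    rw [pvPamCheck_slice u i hiL] at hbad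
    by_cases hc : pvScanCond u (i : Int) = true
    · exact hSent i hig hc (of_decide_eq_true (Bool.and_elim_right hbad))
    · rw [Bool.not_eq_true] at hc
      rw [hc, Bool.false_and] at hbad
      exact Bool.false_ne_true hbad
  rw [hsent, List.map_nil, List.append_nil]

theorem pvIsBase_comp (c : Char) : pvIsBase (pvComp c) = pvIsBase c := by
  unfold pvIsBase pvComp
  split_ifs <;> simp_all

theorem pvComp_eq_G (c : Char) : pvComp c = 'G' ↔ c = 'C' := by
  unfold pvComp
  split_ifs <;> simp_all

-- characters of the reverse complement, read back on the original string
theorem pvRevComp_getElem (seq : List Char) (i : Nat) (hi : i < seq.length) :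
    (pvRevComp seq)[i]! = pvComp seq[seq.length - 1 - i]! := by
  have hlen : i < (pvRevComp seq).length := by rw [pvRevComp_length]; omega
  have h2 : seq.length - 1 - i < seq.length := by omega
  rw [getElem!_pos (pvRevComp seq) i hlen, getElem!_pos seq (seq.length - 1 - i) h2]
  unfold pvRevComp
  rw [List.getElem_reverse, List.getElem_map]
  congr 1
  simp

-- both variants read the edit window the same way
theorem pvWindowArgs_eq (ew : List Int) :
    pvWindowArgs ew = ((PySem.List.pyGet? ew 0).getD 4, (PySem.List.pyGet? ew 1).getD 8) := by
  rcases ew with _ | ⟨a, _ | ⟨b, t⟩⟩ <;>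
    simp [pvWindowArgs, PySem.List.pyGet?, PySem.List.pyIdx?] <;>
    rw [if_pos (by omega : (0:Int) ≤ (t.length : Int) + 1)] <;> simp

theorem pvFloordiv_lit : PySem.Int.floordiv (30 - 23) 2 = 3 := by decide


theorem pvHGS1 (s gl : List Char) : ∀ p : Nat, p + gl.length + 2 ≤ s.length →
    ((if 0 ≤ ((p + gl.length : Nat) : Int) - (gl.length : Int) then
        PySem.List.slice s (some (max (((p + gl.length : Nat) : Int) - (gl.length : Int)) 0))
          (some ((p + gl.length : Nat) : Int))
      else ['N', '/', 'A']) = gl ↔ gl <+: s.drop p) := by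
  intro p _
  have e : ((p + gl.length : Nat) : Int) - (gl.length : Int) = (p : Int) := by push_cast; ring
  rw [e, if_pos (by positivity), max_eq_left (by positivity), PySem.List.slice_natCast]
  have e2 : p + gl.length - p = gl.length := by omega
  rw [e2, List.prefix_iff_eq_take]
  exact ⟨fun h => h.symm, fun h => h.symm⟩

theorem pvHGS2 (s gl : List Char) : ∀ p : Nat, p + gl.length + 2 ≤ (pvRevComp s).length →
    ((if (s.length : Int) - ((p + gl.length : Nat) : Int) - 2 + 2 + (gl.length : Int) ≤ (s.length : Int) then
        PySem.List.slice s (some ((s.length : Int) - ((p + gl.length : Nat) : Int) - 2 + 2))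
          (some ((s.length : Int) - ((p + gl.length : Nat) : Int) - 2 + 2 + (gl.length : Int)))
      else ['N', '/', 'A']) = gl ↔ pvRevComp gl <+: (pvRevComp s).drop p) := by
  intro p hb
  rw [pvRevComp_length] at hb
  rw [if_pos (by push_cast; omega)]
  have e1 : (s.length : Int) - ((p + gl.length : Nat) : Int) - 2 + 2 =
      ((s.length - p - gl.length : Nat) : Int) := by push_cast; omega
  rw [e1]
  have e2 : ((s.length - p - gl.length : Nat) : Int) + (gl.length : Int) =
      ((s.length - p - gl.length + gl.length : Nat) : Int) := by push_cast; ring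
  rw [e2, PySem.List.slice_natCast]
  have e3 : s.length - p - gl.length + gl.length - (s.length - p - gl.length) = gl.length := by omega
  rw [e3, List.prefix_iff_eq_take, pvRevComp_length,
    pvRevComp_slice s p gl.length (by omega)]
  constructor
  · intro h
    rw [h]
  · intro h
    have h2 := congrArg pvRevComp h
    rw [pvRevComp_revComp, pvRevComp_revComp] at h2
    exact h2.symm

theorem pvHT1 (gRNA : String) (edit_window : List Int) (s : List Char) (p : Nat) :
    (("+", ((p + gRNA.toList.length : Nat) : Int), String.ofList gRNA.toList,
      String.ofList (PySem.List.slice s (some ((p + gRNA.toList.length : Nat) : Int))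
        (some (((p + gRNA.toList.length : Nat) : Int) + 2))),
      String.ofList (pvEditWindow gRNA.toList (pvWindowArgs edit_window).1 (pvWindowArgs edit_window).2),
      String.ofList (pvContextPlus s ((p + gRNA.toList.length : Nat) : Int)))
     : String × Int × String × String × String × String)
    = ("+", (p : Int) + (gRNA.toList.length : Int), gRNA,
       String.ofList (PySem.List.slice s (some ((p : Int) + (gRNA.toList.length : Int)))
         (some (((p : Int) + (gRNA.toList.length : Int)) + 2))),
       String.ofList (PySem.List.slice gRNA.toList (some ((PySem.List.pyGet? edit_window 0).getD 4 - 1))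
         (some ((PySem.List.pyGet? edit_window 1).getD 8))),
       String.ofList (PySem.List.slice s (some (max (((p : Int) + (gRNA.toList.length : Int)) - 23) 0))
         (some (max (((p : Int) + (gRNA.toList.length : Int)) - 23) 0 + 30)))) := by
  have e : ((p + gRNA.toList.length : Nat) : Int) = (p : Int) + (gRNA.toList.length : Int) := by
    push_cast; ring
  rw [e]
  simp only [pvEditWindow, pvContextPlus, pvWindowArgs_eq, pvFloordiv_lit, String.ofList_toList]
  have e2 : (p : Int) + ((gRNA.toList.length : Nat) : Int) - 20 - 3 =
      (p : Int) + ((gRNA.toList.length : Nat) : Int) - 23 := by ring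
  rw [e2]

theorem pvHT2 (gRNA : String) (edit_window : List Int) (s : List Char) (p : Nat) :
    (("-", (s.length : Int) - ((p + gRNA.toList.length : Nat) : Int) - 2, String.ofList gRNA.toList,
      String.ofList (PySem.List.slice (pvRevComp s) (some ((p + gRNA.toList.length : Nat) : Int))
        (some (((p + gRNA.toList.length : Nat) : Int) + 2))),
      String.ofList (pvEditWindow gRNA.toList (pvWindowArgs edit_window).1 (pvWindowArgs edit_window).2),
      String.ofList (pvContextMinus s ((s.length : Int) - ((p + gRNA.toList.length : Nat) : Int) - 2)))
     : String × Int × String × String × String × String)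
    = ("-", (s.length : Int) - ((p : Int) + ((pvRevComp gRNA.toList).length : Int)) - 2, gRNA,
       String.ofList (PySem.List.slice (pvRevComp s) (some ((p : Int) + ((pvRevComp gRNA.toList).length : Int)))
         (some (((p : Int) + ((pvRevComp gRNA.toList).length : Int)) + 2))),
       String.ofList (PySem.List.slice gRNA.toList (some ((PySem.List.pyGet? edit_window 0).getD 4 - 1))
         (some ((PySem.List.pyGet? edit_window 1).getD 8))),
       String.ofList (pvRevComp (PySem.List.slice s
         (some (max ((s.length : Int) - ((p : Int) + ((pvRevComp gRNA.toList).length : Int)) - 2 - 6) 0))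
         (some (max ((s.length : Int) - ((p : Int) + ((pvRevComp gRNA.toList).length : Int)) - 2 - 6) 0 + 30))))) := by
  have e : (p : Int) + ((pvRevComp gRNA.toList).length : Int) = ((p + gRNA.toList.length : Nat) : Int) := by
    rw [pvRevComp_length]; push_cast; ring
  rw [e]
  simp only [pvEditWindow, pvContextMinus, pvWindowArgs_eq, pvFloordiv_lit, String.ofList_toList]
  have e2 : (s.length : Int) - ((p + gRNA.toList.length : Nat) : Int) - 2 - 3 - 3 =
      (s.length : Int) - ((p + gRNA.toList.length : Nat) : Int) - 2 - 6 := by ring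
  rw [e2]

-- ===== VERDICT (by name: the statement is the Claim_ definition above) =====
set_option maxHeartbeats 1000000 in
theorem find_ng_pams_both_strands_spec : Claim_unchanged_find_ng_pams_both_strands := by
  intro sequence gRNA edit_window _hdom hpre hnD
  simp only [find_ng_pams_both_strands, find_ng_pams_both_strands_alt]
  set gl : List Char := gRNA.toList with hgl
  set s : List Char := PySem.Chars.upper sequence.toList with hs
  set rev : List Char := pvRevComp s with hrevdef
  have hrl : rev.length = s.length := pvRevComp_length s
  -- forward strand hypotheses for pvLoopA_eq
  have hGS1 := pvHGS1 s gl
  have hSent1 : ∀ i : Nat, i < gl.length → pvScanCond s (i : Int) = true →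
      ¬ (if 0 ≤ (i : Int) - (gl.length : Int) then
          PySem.List.slice s (some (max ((i : Int) - (gl.length : Int)) 0)) (some (i : Int))
        else ['N', '/', 'A']) = gl := by
    intro i hig hsc
    rw [if_neg (by omega)]
    intro hNA
    have hgRNA : gRNA = "N/A" := by
      apply String.toList_inj.mp
      rw [← hgl, ← hNA]
      rfl
    have hlen3 : gl.length = 3 := by rw [← hNA]; rfl
    have hsc' := (pvScanCond_natCast s i).mp hsc
    apply hnD
    refine ⟨hgRNA, Or.inl ⟨i, by omega, by rw [← hs]; exact hsc'.1, ?_, by rw [← hs]; exact hsc'.2.2⟩⟩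
    rw [← hs]
    have hb := hsc'.2.1
    simp only [pvIsBase, Bool.or_eq_true, beq_iff_eq] at hb
    rcases hb with ((h | h) | h) | h <;> simp [h]
  have hfwd :
      List.foldl
        (fun hits i =>
          if pvPamCheck (PySem.List.slice s (some i) (some (i + 2))) = true then
            if (if 0 ≤ i - (gl.length : Int) then
                  PySem.List.slice s (some (max (i - (gl.length : Int)) 0)) (some i)
                else ['N', '/', 'A']) = gl then
              hits ++
                [("+", i,
                    String.ofList (if 0 ≤ i - (gl.length : Int) then
                      PySem.List.slice s (some (max (i - (gl.length : Int)) 0)) (some i)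
                    else ['N', '/', 'A']),
                    String.ofList (PySem.List.slice s (some i) (some (i + 2))),
                    String.ofList (pvEditWindow
                      (if 0 ≤ i - (gl.length : Int) then
                        PySem.List.slice s (some (max (i - (gl.length : Int)) 0)) (some i)
                      else ['N', '/', 'A'])
                      (pvWindowArgs edit_window).1 (pvWindowArgs edit_window).2),
                    String.ofList (pvContextPlus s i))]
            else hits
          else hits)
        [] (PySem.List.pyRange 0 ((s.length : Int) - 1) 1)
      = [] ++ (pvPamScan s gl).map (fun i =>
          ("+", i, gRNA, String.ofList (PySem.List.slice s (some i) (some (i + 2))),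
            String.ofList (PySem.List.slice gl (some ((PySem.List.pyGet? edit_window 0).getD 4 - 1))
              (some ((PySem.List.pyGet? edit_window 1).getD 8))),
            String.ofList (PySem.List.slice s (some (max (i - 23) 0)) (some (max (i - 23) 0 + 30))))) :=
    pvLoopA_eq s gl gl rfl
      (fun i => if 0 ≤ i - (gl.length : Int) then
          PySem.List.slice s (some (max (i - (gl.length : Int)) 0)) (some i)
        else ['N', '/', 'A'])
      (fun i gs pam => ("+", i, String.ofList gs, String.ofList pam,
        String.ofList (pvEditWindow gs (pvWindowArgs edit_window).1 (pvWindowArgs edit_window).2),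
        String.ofList (pvContextPlus s i)))
      (fun i => ("+", i, gRNA, String.ofList (PySem.List.slice s (some i) (some (i + 2))),
        String.ofList (PySem.List.slice gl (some ((PySem.List.pyGet? edit_window 0).getD 4 - 1))
          (some ((PySem.List.pyGet? edit_window 1).getD 8))),
        String.ofList (PySem.List.slice s (some (max (i - 23) 0)) (some (max (i - 23) 0 + 30)))))
      hGS1 hSent1 (fun p _ => pvHT1 gRNA edit_window s p) []
  -- reverse strand hypotheses
  have hGS2 := pvHGS2 s gl
  have hSent2 : ∀ i : Nat, i < gl.length → pvScanCond rev (i : Int) = true →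
      ¬ (if (s.length : Int) - (i : Int) - 2 + 2 + (gl.length : Int) ≤ (s.length : Int) then
          PySem.List.slice s (some ((s.length : Int) - (i : Int) - 2 + 2))
            (some ((s.length : Int) - (i : Int) - 2 + 2 + (gl.length : Int)))
        else ['N', '/', 'A']) = gl := by
    intro i hig hsc
    rw [if_neg (by omega)]
    intro hNA
    have hgRNA : gRNA = "N/A" := by
      apply String.toList_inj.mp
      rw [← hgl, ← hNA]
      rfl
    have hlen3 : gl.length = 3 := by rw [← hNA]; rfl
    have hsc' := (pvScanCond_natCast rev i).mp hsc
    have hiL : i + 2 ≤ s.length := by rw [← hrl]; exact hsc'.1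
    have hchar1 : rev[i]! = pvComp s[s.length - 1 - i]! := by
      rw [hrevdef]; exact pvRevComp_getElem s i (by omega)
    have hchar2 : rev[i + 1]! = pvComp s[s.length - 2 - i]! := by
      rw [hrevdef]
      have e : s.length - 2 - i = s.length - 1 - (i + 1) := by omega
      rw [e]
      exact pvRevComp_getElem s (i + 1) (by omega)
    have hC : s[s.length - 2 - i]! = 'C' := by
      have := hsc'.2.2
      rw [hchar2] at this
      exact (pvComp_eq_G _).mp this
    have hB : pvIsBase s[s.length - 1 - i]! = true := by
      have := hsc'.2.1
      rwa [hchar1, pvIsBase_comp] at this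
    apply hnD
    refine ⟨hgRNA, Or.inr ⟨s.length - 2 - i, by rw [← hs]; omega, by rw [← hs]; omega,
      by rw [← hs]; omega, by rw [← hs]; exact hC, ?_⟩⟩
    rw [← hs]
    have e : s.length - 2 - i + 1 = s.length - 1 - i := by omega
    rw [e]
    simp only [pvIsBase, Bool.or_eq_true, beq_iff_eq] at hB
    rcases hB with ((h | h) | h) | h <;> simp [h]
  have hrev2 :
      List.foldl
        (fun hits i =>
          if pvPamCheck (PySem.List.slice rev (some i) (some (i + 2))) = true then
            if (if (s.length : Int) - i - 2 + 2 + (gl.length : Int) ≤ (s.length : Int) then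
                  PySem.List.slice s (some ((s.length : Int) - i - 2 + 2))
                    (some ((s.length : Int) - i - 2 + 2 + (gl.length : Int)))
                else ['N', '/', 'A']) = gl then
              hits ++
                [("-", (s.length : Int) - i - 2,
                    String.ofList (if (s.length : Int) - i - 2 + 2 + (gl.length : Int) ≤ (s.length : Int) then
                      PySem.List.slice s (some ((s.length : Int) - i - 2 + 2))
                        (some ((s.length : Int) - i - 2 + 2 + (gl.length : Int)))
                    else ['N', '/', 'A']),
                    String.ofList (PySem.List.slice rev (some i) (some (i + 2))),
                    String.ofList (pvEditWindow
                      (if (s.length : Int) - i - 2 + 2 + (gl.length : Int) ≤ (s.length : Int) then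
                        PySem.List.slice s (some ((s.length : Int) - i - 2 + 2))
                          (some ((s.length : Int) - i - 2 + 2 + (gl.length : Int)))
                      else ['N', '/', 'A'])
                      (pvWindowArgs edit_window).1 (pvWindowArgs edit_window).2),
                    String.ofList (pvContextMinus s ((s.length : Int) - i - 2)))]
            else hits
          else hits)
        ([] ++ (pvPamScan s gl).map (fun i =>
          ("+", i, gRNA, String.ofList (PySem.List.slice s (some i) (some (i + 2))),
            String.ofList (PySem.List.slice gl (some ((PySem.List.pyGet? edit_window 0).getD 4 - 1))
              (some ((PySem.List.pyGet? edit_window 1).getD 8))),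
            String.ofList (PySem.List.slice s (some (max (i - 23) 0)) (some (max (i - 23) 0 + 30))))))
        (PySem.List.pyRange 0 ((rev.length : Int) - 1) 1)
      = ([] ++ (pvPamScan s gl).map (fun i =>
          ("+", i, gRNA, String.ofList (PySem.List.slice s (some i) (some (i + 2))),
            String.ofList (PySem.List.slice gl (some ((PySem.List.pyGet? edit_window 0).getD 4 - 1))
              (some ((PySem.List.pyGet? edit_window 1).getD 8))),
            String.ofList (PySem.List.slice s (some (max (i - 23) 0)) (some (max (i - 23) 0 + 30))))))
        ++ (pvPamScan rev (pvRevComp gl)).map (fun i =>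
          ("-", (s.length : Int) - i - 2, gRNA,
            String.ofList (PySem.List.slice rev (some i) (some (i + 2))),
            String.ofList (PySem.List.slice gl (some ((PySem.List.pyGet? edit_window 0).getD 4 - 1))
              (some ((PySem.List.pyGet? edit_window 1).getD 8))),
            String.ofList (pvRevComp (PySem.List.slice s (some (max ((s.length : Int) - i - 2 - 6) 0))
              (some (max ((s.length : Int) - i - 2 - 6) 0 + 30)))))) :=
    pvLoopA_eq rev gl (pvRevComp gl) (pvRevComp_length gl)
      (fun i => if (s.length : Int) - i - 2 + 2 + (gl.length : Int) ≤ (s.length : Int) then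
          PySem.List.slice s (some ((s.length : Int) - i - 2 + 2))
            (some ((s.length : Int) - i - 2 + 2 + (gl.length : Int)))
        else ['N', '/', 'A'])
      (fun i gs pam => ("-", (s.length : Int) - i - 2, String.ofList gs, String.ofList pam,
        String.ofList (pvEditWindow gs (pvWindowArgs edit_window).1 (pvWindowArgs edit_window).2),
        String.ofList (pvContextMinus s ((s.length : Int) - i - 2))))
      (fun i => ("-", (s.length : Int) - i - 2, gRNA,
        String.ofList (PySem.List.slice rev (some i) (some (i + 2))),
        String.ofList (PySem.List.slice gl (some ((PySem.List.pyGet? edit_window 0).getD 4 - 1))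
          (some ((PySem.List.pyGet? edit_window 1).getD 8))),
        String.ofList (pvRevComp (PySem.List.slice s (some (max ((s.length : Int) - i - 2 - 6) 0))
          (some (max ((s.length : Int) - i - 2 - 6) 0 + 30))))))
      hGS2 hSent2 (fun p _ => pvHT2 gRNA edit_window s p)
      ([] ++ (pvPamScan s gl).map (fun i =>
        ("+", i, gRNA, String.ofList (PySem.List.slice s (some i) (some (i + 2))),
          String.ofList (PySem.List.slice gl (some ((PySem.List.pyGet? edit_window 0).getD 4 - 1))
            (some ((PySem.List.pyGet? edit_window 1).getD 8))),
          String.ofList (PySem.List.slice s (some (max (i - 23) 0)) (some (max (i - 23) 0 + 30))))))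
  rw [hfwd, hrev2, List.nil_append]


theorem find_ng_pams_both_strands_changed : Claim_changed_find_ng_pams_both_strands := by
  unfold Claim_changed_find_ng_pams_both_strands
  exact ⟨by decide, by decide, by decide, by decide, by decide, by decide⟩

set_option maxHeartbeats 1000000 in
theorem find_ng_pams_both_strands_tight : Claim_exact_find_ng_pams_both_strands := by
  intro sequence gRNA edit_window _hdom _hpre hD
  simp only [find_ng_pams_both_strands, find_ng_pams_both_strands_alt]
  set gl : List Char := gRNA.toList with hgl
  set s : List Char := PySem.Chars.upper sequence.toList with hs
  set rev : List Char := pvRevComp s with hrevdef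
  obtain ⟨hgRNA, hFR⟩ := hD
  simp only [← hs] at hFR
  have hglNA : gl = ['N', '/', 'A'] := by rw [hgl, hgRNA]; rfl
  have hg3 : gl.length = 3 := by rw [hglNA]; rfl
  have hGS1 := pvHGS1 s gl
  have hGS2 := pvHGS2 s gl
  have hfwdg :
      List.foldl
        (fun hits i =>
          if pvPamCheck (PySem.List.slice s (some i) (some (i + 2))) = true then
            if (if 0 ≤ i - (gl.length : Int) then
                  PySem.List.slice s (some (max (i - (gl.length : Int)) 0)) (some i)
                else ['N', '/', 'A']) = gl then
              hits ++
                [("+", i,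
                    String.ofList (if 0 ≤ i - (gl.length : Int) then
                      PySem.List.slice s (some (max (i - (gl.length : Int)) 0)) (some i)
                    else ['N', '/', 'A']),
                    String.ofList (PySem.List.slice s (some i) (some (i + 2))),
                    String.ofList (pvEditWindow
                      (if 0 ≤ i - (gl.length : Int) then
                        PySem.List.slice s (some (max (i - (gl.length : Int)) 0)) (some i)
                      else ['N', '/', 'A'])
                      (pvWindowArgs edit_window).1 (pvWindowArgs edit_window).2),
                    String.ofList (pvContextPlus s i))]
            else hits
          else hits)
        [] (PySem.List.pyRange 0 ((s.length : Int) - 1) 1)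
      = ([] ++ (pvSentIdx s gl (fun i => if 0 ≤ i - (gl.length : Int) then
            PySem.List.slice s (some (max (i - (gl.length : Int)) 0)) (some i)
          else ['N', '/', 'A'])).map (fun i : Nat =>
          ("+", (i : Int),
            String.ofList (if 0 ≤ (i : Int) - (gl.length : Int) then
              PySem.List.slice s (some (max ((i : Int) - (gl.length : Int)) 0)) (some (i : Int))
            else ['N', '/', 'A']),
            String.ofList (PySem.List.slice s (some (i : Int)) (some ((i : Int) + 2))),
            String.ofList (pvEditWindow
              (if 0 ≤ (i : Int) - (gl.length : Int) then
                PySem.List.slice s (some (max ((i : Int) - (gl.length : Int)) 0)) (some (i : Int))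
              else ['N', '/', 'A'])
              (pvWindowArgs edit_window).1 (pvWindowArgs edit_window).2),
            String.ofList (pvContextPlus s (i : Int)))))
        ++ (pvPamScan s gl).map (fun i =>
          ("+", i, gRNA, String.ofList (PySem.List.slice s (some i) (some (i + 2))),
            String.ofList (PySem.List.slice gl (some ((PySem.List.pyGet? edit_window 0).getD 4 - 1))
              (some ((PySem.List.pyGet? edit_window 1).getD 8))),
            String.ofList (PySem.List.slice s (some (max (i - 23) 0)) (some (max (i - 23) 0 + 30))))) :=
    pvLoopA_eq_gen s gl gl rfl
      (fun i => if 0 ≤ i - (gl.length : Int) then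
          PySem.List.slice s (some (max (i - (gl.length : Int)) 0)) (some i)
        else ['N', '/', 'A'])
      (fun i gs pam => ("+", i, String.ofList gs, String.ofList pam,
        String.ofList (pvEditWindow gs (pvWindowArgs edit_window).1 (pvWindowArgs edit_window).2),
        String.ofList (pvContextPlus s i)))
      (fun i => ("+", i, gRNA, String.ofList (PySem.List.slice s (some i) (some (i + 2))),
        String.ofList (PySem.List.slice gl (some ((PySem.List.pyGet? edit_window 0).getD 4 - 1))
          (some ((PySem.List.pyGet? edit_window 1).getD 8))),
        String.ofList (PySem.List.slice s (some (max (i - 23) 0)) (some (max (i - 23) 0 + 30)))))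
      hGS1 (fun p _ => pvHT1 gRNA edit_window s p) []
  rw [hfwdg]
  intro heq
  have hrevg := pvLoopA_eq_gen rev gl (pvRevComp gl) (pvRevComp_length gl)
      (fun i => if (s.length : Int) - i - 2 + 2 + (gl.length : Int) ≤ (s.length : Int) then
          PySem.List.slice s (some ((s.length : Int) - i - 2 + 2))
            (some ((s.length : Int) - i - 2 + 2 + (gl.length : Int)))
        else ['N', '/', 'A'])
      (fun i gs pam => ("-", (s.length : Int) - i - 2, String.ofList gs, String.ofList pam,
        String.ofList (pvEditWindow gs (pvWindowArgs edit_window).1 (pvWindowArgs edit_window).2),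
        String.ofList (pvContextMinus s ((s.length : Int) - i - 2))))
      (fun i => ("-", (s.length : Int) - i - 2, gRNA,
        String.ofList (PySem.List.slice rev (some i) (some (i + 2))),
        String.ofList (PySem.List.slice gl (some ((PySem.List.pyGet? edit_window 0).getD 4 - 1))
          (some ((PySem.List.pyGet? edit_window 1).getD 8))),
        String.ofList (pvRevComp (PySem.List.slice s (some (max ((s.length : Int) - i - 2 - 6) 0))
          (some (max ((s.length : Int) - i - 2 - 6) 0 + 30))))))
      hGS2 (fun p _ => pvHT2 gRNA edit_window s p)
  have heq2 := heq.symm.trans (hrevg _)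
  have hlen := congrArg List.length heq2
  simp only [List.length_append, List.length_map, List.length_nil] at hlen
  -- at least one sentinel hit exists inside D_
  have hpos : 0 < (pvSentIdx s gl (fun i => if 0 ≤ i - (gl.length : Int) then
        PySem.List.slice s (some (max (i - (gl.length : Int)) 0)) (some i)
      else ['N', '/', 'A'])).length +
      (pvSentIdx rev gl (fun i => if (s.length : Int) - i - 2 + 2 + (gl.length : Int) ≤ (s.length : Int) then
        PySem.List.slice s (some ((s.length : Int) - i - 2 + 2))
          (some ((s.length : Int) - i - 2 + 2 + (gl.length : Int)))
      else ['N', '/', 'A'])).length := by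
    rcases hFR with ⟨i, hi3, hiL, hbase, hG⟩ | ⟨pp, hpL, hp2, hp4, hC, hbase⟩
    · have hmem : i ∈ pvSentIdx s gl (fun i => if 0 ≤ i - (gl.length : Int) then
          PySem.List.slice s (some (max (i - (gl.length : Int)) 0)) (some i)
        else ['N', '/', 'A']) := by
        rw [pvSentIdx]
        refine List.mem_filter.mpr ⟨List.mem_range.mpr (by omega), ?_⟩
        have hsc : pvScanCond s (i : Int) = true := by
          refine (pvScanCond_natCast s i).mpr ⟨hiL, ?_, hG⟩
          simp only [pvIsBase, Bool.or_eq_true, beq_iff_eq]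
          tauto
        rw [pvPamCheck_slice s i hiL, hsc, Bool.true_and, decide_eq_true_eq,
          if_neg (by omega), hglNA]
      have := List.length_pos_of_mem hmem
      omega
    · have hmem : s.length - 2 - pp ∈ pvSentIdx rev gl
          (fun i => if (s.length : Int) - i - 2 + 2 + (gl.length : Int) ≤ (s.length : Int) then
            PySem.List.slice s (some ((s.length : Int) - i - 2 + 2))
              (some ((s.length : Int) - i - 2 + 2 + (gl.length : Int)))
          else ['N', '/', 'A']) := by
        rw [pvSentIdx]
        have hrl : rev.length = s.length := pvRevComp_length s
        refine List.mem_filter.mpr ⟨List.mem_range.mpr (by omega), ?_⟩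
        have hiL2 : (s.length - 2 - pp) + 2 ≤ rev.length := by omega
        have hsc : pvScanCond rev ((s.length - 2 - pp : Nat) : Int) = true := by
          refine (pvScanCond_natCast rev (s.length - 2 - pp)).mpr ⟨hiL2, ?_, ?_⟩
          · have hch : rev[s.length - 2 - pp]! = pvComp s[pp + 1]! := by
              rw [hrevdef]
              have h0 := pvRevComp_getElem s (s.length - 2 - pp) (by omega)
              rwa [show s.length - 1 - (s.length - 2 - pp) = pp + 1 from by omega] at h0
            rw [hch, pvIsBase_comp]
            simp only [pvIsBase, Bool.or_eq_true, beq_iff_eq]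
            tauto
          · have hch : rev[s.length - 2 - pp + 1]! = pvComp s[pp]! := by
              rw [hrevdef]
              have h0 := pvRevComp_getElem s (s.length - 2 - pp + 1) (by omega)
              rwa [show s.length - 1 - (s.length - 2 - pp + 1) = pp from by omega] at h0
            rw [hch]
            exact (pvComp_eq_G _).mpr hC
        rw [pvPamCheck_slice rev (s.length - 2 - pp) hiL2, hsc, Bool.true_and,
          decide_eq_true_eq, if_neg (by omega), hglNA]
      have := List.length_pos_of_mem hmem
      omega
  omega
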